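-- pv_equiv track=rewrite | github.com/lihuahua123/skill | scripts/run_swebench_with_minisweagent.py | _extract_failed_test_ids
-- ===== SOURCE A (Python) =====
-- def _strip_pytest_parameterization(test_id: str) -> str:
--     if "[" in test_id:
--         return test_id.split("[", 1)[0]
--     return test_id
--
-- def _normalize_failed_test_id(line: str) -> str:
--     raw = line.removeprefix("FAILED ").strip()
--     if " - " in raw:
--         raw = raw.split(" - ", 1)[0].strip()
--     return _strip_pytest_parameterization(raw)
--
-- def _extract_failed_test_ids(text: str, limit: int = 8) -> list[str]:
--     ids: list[str] = []
--     seen: set[str] = set()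
--     for raw_line in text.splitlines():
--         stripped = raw_line.strip()
--         candidate = ""
--         if stripped.startswith("FAILED "):
--             candidate = _normalize_failed_test_id(stripped)
--         elif "::" in stripped and (" FAILED" in stripped or " ERROR" in stripped):
--             candidate = _strip_pytest_parameterization(stripped.split()[0])
--         if candidate and candidate not in seen:
--             ids.append(candidate)
--             seen.add(candidate)
--         if len(ids) >= limit:
--             break
--     return ids
-- ===== SOURCE B (Python) =====
-- def _strip_pytest_parameterization(test_id: str) -> str:
--     if "[" in test_id:
--         return test_id.split("[", 1)[0]
--     return test_id
--
-- def _normalize_failed_test_id(line: str) -> str: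
--     raw = line.removeprefix("FAILED ").strip()
--     if " - " in raw:
--         raw = raw.split(" - ", 1)[0].strip()
--     return _strip_pytest_parameterization(raw)
--
-- def _line_candidate(raw_line: str) -> str:
--     stripped = raw_line.strip()
--     if stripped.startswith("FAILED "):
--         return _normalize_failed_test_id(stripped)
--     if "::" in stripped and (" FAILED" in stripped or " ERROR" in stripped):
--         return _strip_pytest_parameterization(stripped.split()[0])
--     return ""
--
-- def _extract_failed_test_ids(text: str, limit: int = 8) -> list[str]:
--     # Staged: collect every per-line candidate, then keep a candidate exactly when
--     # it does not occur earlier in the candidate list (first-occurrence filter by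
--     # prefix membership -- no auxiliary seen-set), then truncate to the limit.
--     cands = [c for c in map(_line_candidate, text.splitlines()) if c]
--     firsts = [c for i, c in enumerate(cands) if c not in cands[:i]]
--     return firsts[:max(limit, 0)]
-- ===== Notes on version B (the rewrite author's own statement) =====
-- stated objective: alternative
-- what changed: A's single pass that threads a seen-set and breaks early once the cap is reached is replaced by three stages with no auxiliary set at all: collect every per-line candidate, keep each candidate iff it does not occur earlier in the candidate list (first-occurrence filter by prefix membership), then truncate to the limit.
-- intended difference: When limit <= 0 and the first line of text matches a failure pattern, A still returns that line's test id (its break only fires after the first line was processed), while B returns [], the intended meaning of a limit of 0 or less. — e.g. on _extract_failed_test_ids("FAILED a::b", 0): A returns ["a::b"], B returns []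
import Mathlib
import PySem

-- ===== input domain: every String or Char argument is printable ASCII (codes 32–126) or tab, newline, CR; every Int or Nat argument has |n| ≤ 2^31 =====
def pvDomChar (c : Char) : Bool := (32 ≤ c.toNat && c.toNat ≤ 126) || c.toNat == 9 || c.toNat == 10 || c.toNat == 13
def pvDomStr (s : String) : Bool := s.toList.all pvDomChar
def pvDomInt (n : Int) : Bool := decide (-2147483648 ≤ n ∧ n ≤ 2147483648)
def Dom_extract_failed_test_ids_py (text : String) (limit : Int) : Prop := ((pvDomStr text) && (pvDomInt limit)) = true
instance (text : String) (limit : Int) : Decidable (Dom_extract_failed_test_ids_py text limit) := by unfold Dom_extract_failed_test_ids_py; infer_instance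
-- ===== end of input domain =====

-- B replaces A's single pass (seen-set + early break) by staged passes with no auxiliary set:
-- collect all candidates, first-occurrence filter by prefix membership, truncate ("alternative").

-- ===== PORT A =====
def strip_pytest_parameterization (test_id : String) : String :=
  if PySem.Str.isIn "[" test_id then
    -- test_id.split("[", 1)[0]: sep ≠ "" so splitMax? is some; a split result is never [], so index 0 is in range
    ((PySem.Str.splitMax? test_id "[" 1).getD []).headD ""
  else test_id

def normalize_failed_test_id (line : String) : String :=
  -- line.removeprefix("FAILED ") ported by hand (exact): drop the 7-char prefix iff present
  let raw0 := if PySem.Str.startswith line "FAILED " then PySem.Str.slice line (some 7) none else line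
  let raw := PySem.Str.strip raw0
  let raw := if PySem.Str.isIn " - " raw then
      -- raw.split(" - ", 1)[0]: sep ≠ "", split result never []
      PySem.Str.strip (((PySem.Str.splitMax? raw " - " 1).getD []).headD "")
    else raw
  strip_pytest_parameterization raw

def extract_failed_test_ids_loop (limit : Int) (lines ids : List String) (seen : PySem.Set String) : List String :=
  match lines with
  | [] => ids
  | raw_line :: rest =>
    let stripped := PySem.Str.strip raw_line
    let candidate : String :=
      if PySem.Str.startswith stripped "FAILED " then
        normalize_failed_test_id stripped
      else if PySem.Str.isIn "::" stripped && (PySem.Str.isIn " FAILED" stripped || PySem.Str.isIn " ERROR" stripped) then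
        -- stripped.split()[0]: "::" occurs in stripped, so split() is nonempty and index 0 is in range
        strip_pytest_parameterization ((PySem.Str.split₀ stripped).headD "")
      else ""
    let p := if candidate ≠ "" ∧ seen.contains candidate = false then
        (ids ++ [candidate], PySem.Set.add seen candidate)
      else (ids, seen)
    if limit ≤ (p.1.length : Int) then p.1
    else extract_failed_test_ids_loop limit rest p.1 p.2

def extract_failed_test_ids_py (text : String) (limit : Int) : List String :=
  extract_failed_test_ids_loop limit (PySem.Str.splitlines text) [] PySem.Set.empty

-- ===== PORT B =====
def line_candidate (raw_line : String) : String :=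
  let stripped := PySem.Str.strip raw_line
  if PySem.Str.startswith stripped "FAILED " then
    normalize_failed_test_id stripped
  else if PySem.Str.isIn "::" stripped && (PySem.Str.isIn " FAILED" stripped || PySem.Str.isIn " ERROR" stripped) then
    strip_pytest_parameterization ((PySem.Str.split₀ stripped).headD "")
  else ""

def extract_failed_test_ids_py_alt (text : String) (limit : Int) : List String :=
  let cands := ((PySem.Str.splitlines text).map line_candidate).filter (fun c => decide (c ≠ ""))
  -- [c for i, c in enumerate(cands) if c not in cands[:i]]
  let firsts := ((PySem.List.enumerate cands 0).filter
      (fun p => decide (p.2 ∉ PySem.List.slice cands none (some p.1)))).map (·.2)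
  PySem.List.slice firsts none (some (max limit 0))

-- ===== PRECONDITION & SPEC =====
-- does this line yield a (nonempty) failed-test id? branch tests plus "the id does not start with '['"
-- (used only to NAME the affected inputs; closed-form prefix/membership/first-char tests)
def pvFailLine (l : String) : Bool :=
  let t := PySem.Str.strip l
  if PySem.Str.startswith t "FAILED " then
    ((PySem.Chars.strip (t.toList.drop 7)).headD '[') != '['
  else
    (PySem.Str.isIn "::" t && (PySem.Str.isIn " FAILED" t || PySem.Str.isIn " ERROR" t)) &&
      ((t.toList.headD '[') != '[')

-- When limit ≤ 0 and the first line of text matches a failure pattern, A's break fires only AFTER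
-- that line was processed, so A can still return that line's test id despite the nonpositive limit,
-- while B returns [], the intended meaning of a limit of 0 or less.
def D_extract_failed_test_ids_py (text : String) (limit : Int) : Prop :=
  limit ≤ 0 ∧ PySem.Str.splitlines text ≠ [] ∧ pvFailLine ((PySem.Str.splitlines text).headD "") = true
instance (text : String) (limit : Int) : Decidable (D_extract_failed_test_ids_py text limit) := by
  unfold D_extract_failed_test_ids_py; infer_instance

def Spec_extract_failed_test_ids_py (text : String) (limit : Int) (out : List String) : Prop :=
  ¬ D_extract_failed_test_ids_py text limit → out = extract_failed_test_ids_py_alt text limit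
instance (text : String) (limit : Int) (out : List String) : Decidable (Spec_extract_failed_test_ids_py text limit out) := by
  unfold Spec_extract_failed_test_ids_py; infer_instance

def pvDiffWitness_extract_failed_test_ids_py : String × Int := ("FAILED a::b", 0)
def pvDiffWitnessOut_extract_failed_test_ids_py : (List String) × (List String) := (["a::b"], [])

-- ===== CLAIM (what is proved, stated in full; the proofs are below) =====
def Claim_unchanged_extract_failed_test_ids_py : Prop := ∀ (text : String) (limit : Int), Dom_extract_failed_test_ids_py text limit → Spec_extract_failed_test_ids_py text limit (extract_failed_test_ids_py text limit)
def Claim_changed_extract_failed_test_ids_py : Prop := Dom_extract_failed_test_ids_py (pvDiffWitness_extract_failed_test_ids_py.1) (pvDiffWitness_extract_failed_test_ids_py.2) ∧ D_extract_failed_test_ids_py (pvDiffWitness_extract_failed_test_ids_py.1) (pvDiffWitness_extract_failed_test_ids_py.2) ∧ extract_failed_test_ids_py (pvDiffWitness_extract_failed_test_ids_py.1) (pvDiffWitness_extract_failed_test_ids_py.2) = pvDiffWitnessOut_extract_failed_test_ids_py.1 ∧ extract_failed_test_ids_py_alt (pvDiffWitness_extract_failed_test_ids_py.1) (pvDiffWitness_extract_failed_test_ids_py.2)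 = pvDiffWitnessOut_extract_failed_test_ids_py.2 ∧ pvDiffWitnessOut_extract_failed_test_ids_py.1 ≠ pvDiffWitnessOut_extract_failed_test_ids_py.2
def Claim_exact_extract_failed_test_ids_py : Prop := ∀ (text : String) (limit : Int), Dom_extract_failed_test_ids_py text limit → D_extract_failed_test_ids_py text limit → extract_failed_test_ids_py text limit ≠ extract_failed_test_ids_py_alt text limit

-- ===== LEMMAS AND PROOFS =====

-- ---- generic string facts used by the candidate characterisation ----

-- the prefix of l before the first occurrence of sep (whole l if sep does not occur)
def pvBefore (sep : List Char) : List Char → List Char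
  | [] => []
  | c :: rest => if sep.isPrefixOf (c :: rest) then [] else c :: pvBefore sep rest

theorem pvGoZero (sep : List Char) (fuel : Nat) (l cur : List Char) (acc : List (List Char)) :
    PySem.Chars.splitOnMax.go sep fuel 0 l cur acc = ((cur.reverse ++ l) :: acc).reverse := by
  cases fuel <;> cases l <;> simp [PySem.Chars.splitOnMax.go]

theorem pvGoOne (sep : List Char) (l : List Char) : ∀ (fuel : Nat) (cur : List Char) (acc : List (List Char)),
    l.length < fuel →
    ∃ tail, PySem.Chars.splitOnMax.go sep fuel 1 l cur acc =
      acc.reverse ++ ((cur.reverse ++ pvBefore sep l) :: tail) := by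
  induction l with
  | nil =>
    intro fuel cur acc hf
    cases fuel with
    | zero => simp at hf
    | succ f => exact ⟨[], by simp [PySem.Chars.splitOnMax.go, pvBefore]⟩
  | cons c rest ih =>
    intro fuel cur acc hf
    cases fuel with
    | zero => simp at hf
    | succ f =>
      by_cases hp : sep.isPrefixOf (c :: rest)
      · refine ⟨[List.drop sep.length (c :: rest)], ?_⟩
        rw [show pvBefore sep (c :: rest) = [] from by simp [pvBefore, hp]]
        simp [PySem.Chars.splitOnMax.go, hp, pvGoZero]
      · obtain ⟨tail, htail⟩ := ih f (c :: cur) acc (by simp only [List.length_cons] at hf; omega)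
        refine ⟨tail, ?_⟩
        rw [show pvBefore sep (c :: rest) = c :: pvBefore sep rest from by simp [pvBefore, hp]]
        simp only [PySem.Chars.splitOnMax.go, hp, Bool.false_eq_true, if_false, one_ne_zero, htail]
        simp

theorem pvSplitOnMaxOne (sep : List Char) (l : List Char) :
    ∃ tail, PySem.Chars.splitOnMax l sep 1 = pvBefore sep l :: tail := by
  obtain ⟨tail, h⟩ := pvGoOne sep l (l.length + 1) [] [] (by omega)
  exact ⟨tail, by simpa [PySem.Chars.splitOnMax] using h⟩

theorem pvSplitZeroGo (s : List Char) :
    (∀ acc : List (List Char), ∃ tail, PySem.Chars.split₀.go s [] acc = acc.reverse ++ tail) ∧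
    (∀ (cur : List Char) (acc : List (List Char)), cur ≠ [] →
      ∃ tail, PySem.Chars.split₀.go s cur acc =
        acc.reverse ++ ((cur.reverse ++ s.takeWhile (fun d => !PySem.Chars.isspace d)) :: tail)) := by
  induction s with
  | nil =>
    constructor
    · intro acc; exact ⟨[], by simp [PySem.Chars.split₀.go]⟩
    · intro cur acc hcur
      refine ⟨[], ?_⟩
      simp [PySem.Chars.split₀.go, hcur]
  | cons c rest ih =>
    obtain ⟨ihP, ihQ⟩ := ih
    constructor
    · intro acc
      by_cases hsp : PySem.Chars.isspace c
      · obtain ⟨tail, h⟩ := ihP acc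
        exact ⟨tail, by simp [PySem.Chars.split₀.go, hsp, h]⟩
      · obtain ⟨tail, h⟩ := ihQ [c] acc (by simp)
        refine ⟨(([c].reverse ++ rest.takeWhile (fun d => !PySem.Chars.isspace d)) :: tail), ?_⟩
        simp only [PySem.Chars.split₀.go, hsp, Bool.false_eq_true, if_false, h]
    · intro cur acc hcur
      by_cases hsp : PySem.Chars.isspace c
      · obtain ⟨tail, h⟩ := ihP (cur.reverse :: acc)
        refine ⟨tail, ?_⟩
        have hec : cur.isEmpty = false := by cases cur <;> simp_all
        simp only [PySem.Chars.split₀.go, hsp, if_true, hec, Bool.false_eq_true, if_false, h,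
          List.takeWhile_cons, Bool.not_true, List.reverse_cons]
        simp
      · obtain ⟨tail, h⟩ := ihQ (c :: cur) acc (by simp)
        refine ⟨tail, ?_⟩
        simp only [PySem.Chars.split₀.go, hsp, Bool.false_eq_true, if_false, h,
          List.takeWhile_cons, Bool.not_false, List.reverse_cons]
        simp

theorem pvSplitZeroHead (t : List Char) (c : Char) (hh : t.head? = some c)
    (hs : PySem.Chars.isspace c = false) :
    ∃ tail, PySem.Chars.split₀ t =
      (c :: t.tail.takeWhile (fun d => !PySem.Chars.isspace d)) :: tail := by
  match t, hh with
  | c :: rest, rfl =>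
    obtain ⟨tail, h⟩ := (pvSplitZeroGo rest).2 [c] [] (by simp)
    refine ⟨tail, ?_⟩
    simp only [PySem.Chars.split₀, PySem.Chars.split₀.go, hs, Bool.false_eq_true, if_false, h]
    simp

theorem pvDropWhileHead (x : List Char) (c : Char)
    (h : (List.dropWhile PySem.Chars.isspace x).head? = some c) : PySem.Chars.isspace c = false := by
  induction x with
  | nil => simp at h
  | cons a rest ih =>
    by_cases hsp : PySem.Chars.isspace a
    · exact ih (by simpa [List.dropWhile_cons, hsp] using h)
    · simp only [List.dropWhile_cons, hsp, Bool.false_eq_true, if_false, List.head?_cons,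
        Option.some.injEq] at h
      subst h; simpa using hsp

theorem pvPrefixHead (p x : List Char) (c : Char) (hp : p <+: x) (hh : p.head? = some c) :
    x.head? = some c := by
  obtain ⟨t, rfl⟩ := hp
  cases p with
  | nil => simp at hh
  | cons a q => simpa using hh

theorem pvRstripPrefix (x : List Char) : PySem.Chars.rstrip x <+: x := by
  have h1 : List.dropWhile PySem.Chars.isspace x.reverse <:+ x.reverse := List.dropWhile_suffix _
  have h2 : (PySem.Chars.rstrip x).reverse <:+ x.reverse := by
    simpa [PySem.Chars.rstrip] using h1
  exact List.reverse_suffix.mp h2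

theorem pvStripHeadNotSpace (x : List Char) (c : Char)
    (h : (PySem.Chars.strip x).head? = some c) : PySem.Chars.isspace c = false := by
  have hpre : PySem.Chars.strip x <+: PySem.Chars.lstrip x := pvRstripPrefix _
  have hx : (PySem.Chars.lstrip x).head? = some c := pvPrefixHead _ _ _ hpre h
  exact pvDropWhileHead x c (by simpa [PySem.Chars.lstrip] using hx)

theorem pvStripCons (x : List Char) (c : Char) (hh : x.head? = some c)
    (hs : PySem.Chars.isspace c = false) :
    (PySem.Chars.strip x).head? = some c ∧ PySem.Chars.strip x ≠ [] := by
  match x, hh with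
  | c :: x', rfl =>
    have hls : PySem.Chars.lstrip (c :: x') = c :: x' := by
      simp [PySem.Chars.lstrip, List.dropWhile_cons, hs]
    have hne : PySem.Chars.rstrip (c :: x') ≠ [] := by
      intro hnil
      have : ∀ a ∈ (c :: x').reverse, PySem.Chars.isspace a = true := by
        rw [← List.dropWhile_eq_nil_iff]
        simpa [PySem.Chars.rstrip, List.reverse_eq_nil_iff] using hnil
      have := this c (by simp)
      simp [hs] at this
    have hpre : PySem.Chars.rstrip (c :: x') <+: (c :: x') := pvRstripPrefix _
    obtain ⟨d, hd⟩ : ∃ d, (PySem.Chars.rstrip (c :: x')).head? = some d := by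
      cases hr : PySem.Chars.rstrip (c :: x') with
      | nil => exact absurd hr hne
      | cons a q => exact ⟨a, rfl⟩
    have hxd := pvPrefixHead _ _ _ hpre hd
    simp only [List.head?_cons, Option.some.injEq] at hxd
    subst hxd
    constructor
    · simpa [PySem.Chars.strip, hls] using hd
    · simpa [PySem.Chars.strip, hls] using hne

-- first component of s.split(sep, 1) on the String side
theorem pvSplitMaxHead (s sep : String) (hsep : sep.toList ≠ []) :
    ((PySem.Str.splitMax? s sep 1).getD []).headD "" = String.ofList (pvBefore sep.toList s.toList) := by
  obtain ⟨tail, htail⟩ := pvSplitOnMaxOne sep.toList s.toList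
  simp [PySem.Str.splitMax?, PySem.Chars.splitMax?, hsep, htail]

-- _strip_pytest_parameterization(s) is empty iff s is empty or starts with '['
theorem pvSPEmptyIff (s : String) (c : Char) (hh : s.toList.head? = some c) :
    strip_pytest_parameterization s = "" ↔ c = '[' := by
  rw [strip_pytest_parameterization]
  by_cases hin : PySem.Str.isIn "[" s
  · rw [if_pos hin, pvSplitMaxHead s "[" (by decide)]
    match hsl : s.toList, hh with
    | c :: rest, rfl =>
      by_cases hc : c = '['
      · subst hc
        rw [show pvBefore "[".toList ('[' :: rest) = [] from by
          simp [pvBefore, List.isPrefixOf]]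
        simp
      · rw [show pvBefore "[".toList (c :: rest) = c :: pvBefore "[".toList rest from by
          simp [pvBefore, List.isPrefixOf]
          exact fun h => hc h.symm]
        constructor
        · intro h
          have := congrArg String.toList h
          simp at this
        · intro h; exact absurd h hc
  · rw [if_neg hin]
    have hc : ¬ c = '[' := by
      intro hc; subst hc
      have hmem : '[' ∈ s.toList := by
        cases hx : s.toList with
        | nil => rw [hx] at hh; simp at hh
        | cons a q => rw [hx] at hh; simp at hh; simp [hh]
      have hinf : "[".toList <:+: s.toList := by
        simpa using (List.singleton_infix_iff '[' s.toList).mpr hmem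
      have : PySem.Str.isIn "[" s = true := by
        rw [PySem.Str.isIn, PySem.Chars.isIn_iff_infix]; exact hinf
      exact hin this
    constructor
    · intro h
      rw [h] at hh; simp at hh
    · intro h; exact absurd h hc

-- _normalize_failed_test_id(line) is empty iff the first non-space char after "FAILED " is missing or '['
theorem pvNormEmptyIff (line : String) (hsw : PySem.Str.startswith line "FAILED " = true) :
    normalize_failed_test_id line = "" ↔
      (PySem.Chars.strip (line.toList.drop 7)).headD '[' = '[' := by
  rw [normalize_failed_test_id]
  simp only [hsw, if_true]
  have hraw : (PySem.Str.strip (PySem.Str.slice line (some 7) none)).toList =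
      PySem.Chars.strip (line.toList.drop 7) := by
    simp [PySem.Str.strip, PySem.Str.slice, PySem.List.slice_from _ (by omega : (0:Int) ≤ 7)]
  cases hcase : PySem.Chars.strip (line.toList.drop 7) with
  | nil =>
    have hstr : PySem.Str.strip (PySem.Str.slice line (some 7) none) = "" := by
      rw [← String.toList_eq_nil_iff, hraw, hcase]
    rw [hstr]
    decide
  | cons c u' =>
    rw [hcase] at hraw
    have hcsp : PySem.Chars.isspace c = false := by
      apply pvStripHeadNotSpace (line.toList.drop 7)
      rw [hcase]; rfl
    simp only [List.headD_cons]
    by_cases hdash : PySem.Str.isIn " - " (PySem.Str.strip (PySem.Str.slice line (some 7) none)) = true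
    · rw [if_pos hdash, pvSplitMaxHead _ " - " (by decide), hraw]
      rw [show pvBefore " - ".toList (c :: u') = c :: pvBefore " - ".toList u' from by
        simp [pvBefore]
        intro h
        rw [← h] at hcsp
        simp [PySem.Chars.isspace] at hcsp]
      have hh2 : (PySem.Str.strip (String.ofList (c :: pvBefore " - ".toList u'))).toList.head? = some c := by
        have := (pvStripCons (c :: pvBefore " - ".toList u') c rfl hcsp).1
        simpa [PySem.Str.strip, String.toList_ofList] using this
      rw [pvSPEmptyIff _ c hh2]
    · rw [if_neg hdash]
      have hh : (PySem.Str.strip (PySem.Str.slice line (some 7) none)).toList.head? = some c := by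
        rw [hraw]; rfl
      rw [pvSPEmptyIff _ c hh]

-- master lemma: the per-line candidate is empty exactly when pvFailLine is false
theorem pvCandEmptyIff (l : String) : line_candidate l = "" ↔ pvFailLine l = false := by
  rw [line_candidate, pvFailLine]
  by_cases hsw : PySem.Str.startswith (PySem.Str.strip l) "FAILED " = true
  · simp only [hsw, if_true]
    rw [pvNormEmptyIff _ hsw]
    have hbr : (PySem.Str.strip l).toList = PySem.Chars.strip l.toList := String.toList_ofList
    rw [hbr]
    simp [bne]
  · simp only [hsw, if_false, Bool.not_eq_true] at *
    simp only [hsw, Bool.false_eq_true, if_false]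
    by_cases hcond : (PySem.Str.isIn "::" (PySem.Str.strip l) &&
        (PySem.Str.isIn " FAILED" (PySem.Str.strip l) || PySem.Str.isIn " ERROR" (PySem.Str.strip l))) = true
    · rw [if_pos hcond]
      have htne : (PySem.Str.strip l).toList ≠ [] := by
        intro hnil
        have h2 : PySem.Str.isIn "::" (PySem.Str.strip l) = true := by
          simp only [Bool.and_eq_true] at hcond; exact hcond.1
        rw [PySem.Str.isIn, PySem.Chars.isIn_iff_infix, hnil] at h2
        have := List.eq_nil_of_infix_nil h2
        simp at this
      obtain ⟨c, hc⟩ : ∃ c, (PySem.Str.strip l).toList.head? = some c := by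
        cases hx : (PySem.Str.strip l).toList with
        | nil => exact absurd hx htne
        | cons a q => exact ⟨a, rfl⟩
      have hcsp : PySem.Chars.isspace c = false := by
        apply pvStripHeadNotSpace l.toList
        rw [show (PySem.Chars.strip l.toList) = (PySem.Str.strip l).toList from by
          simp [PySem.Str.strip]]
        exact hc
      obtain ⟨tail, htok⟩ := pvSplitZeroHead _ c hc hcsp
      have htok' : (PySem.Str.split₀ (PySem.Str.strip l)).headD "" =
          String.ofList (c :: ((PySem.Str.strip l).toList.tail.takeWhile (fun d => !PySem.Chars.isspace d))) := by
        rw [PySem.Str.split₀, htok]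
        rfl
      rw [htok', pvSPEmptyIff _ c (by rw [String.toList_ofList]; rfl)]
      have hhd : (PySem.Str.strip l).toList.headD '[' = c := by
        cases hx : (PySem.Str.strip l).toList with
        | nil => exact absurd hx htne
        | cons a q => rw [hx] at hc; simp at hc; simp [hc]
      rw [hcond, hhd]
      constructor
      · intro h; simp [h]
      · intro h; simpa using h
    · simp only [hcond, Bool.false_eq_true, if_false, ite_eq_right_iff]
      have : (PySem.Str.isIn "::" (PySem.Str.strip l) &&
          (PySem.Str.isIn " FAILED" (PySem.Str.strip l) || PySem.Str.isIn " ERROR" (PySem.Str.strip l))) = false := by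
        simpa using hcond
      simp [this]


-- A's dedup relative to an already-seen set: the fresh elements in first-occurrence order
def pvDedupNew (seen : List String) : List String → List String
  | [] => []
  | c :: cs => if seen.contains c then pvDedupNew seen cs else c :: pvDedupNew (seen ++ [c]) cs

-- pvDedupNew only looks at MEMBERSHIP in the seen list
theorem pvDedupNew_congr (cs : List String) : ∀ (s s' : List String),
    (∀ x, x ∈ s ↔ x ∈ s') → pvDedupNew s cs = pvDedupNew s' cs := by
  induction cs with
  | nil => intro s s' _; rfl
  | cons c cs ih =>
    intro s s' hmem
    have hc : s.contains c = s'.contains c := by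
      by_cases h : c ∈ s
      · have h' : c ∈ s' := (hmem c).mp h
        simp [h, h']
      · have h' : c ∉ s' := fun hx => h ((hmem c).mpr hx)
        simp [h, h']
    rw [pvDedupNew, pvDedupNew, hc]
    by_cases h' : s'.contains c
    · rw [h', if_pos rfl, if_pos rfl, ih s s' hmem]
    · have h'' : s'.contains c = false := by simpa using h'
      rw [h'', if_neg (by simp), if_neg (by simp)]
      refine congrArg (c :: ·) (ih _ _ ?_)
      intro x
      simp only [List.mem_append, List.mem_singleton]
      exact or_congr_left (hmem x)

-- B's first-occurrence filter by prefix membership equals pvDedupNew: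
-- done = the candidates already passed (the global prefix), seen as the "seen" list
theorem pvEnumFilter_eq (cs : List String) : ∀ (done : List String),
    (((PySem.List.enumerate cs (done.length : Int)).filter
        (fun p => decide (p.2 ∉ PySem.List.slice (done ++ cs) none (some p.1)))).map (·.2))
      = pvDedupNew done cs := by
  induction cs with
  | nil => intro done; simp [PySem.List.enumerate_nil, pvDedupNew]
  | cons c rest ih =>
    intro done
    rw [PySem.List.enumerate_cons]
    have hslice : PySem.List.slice (done ++ c :: rest) none (some ((done.length : Nat) : Int)) = done := by
      rw [PySem.List.slice_to_natCast]
      exact List.take_left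
    have hstep : ((done.length : Int) + 1) = (((done ++ [c]).length : Nat) : Int) := by
      simp
    have happ : done ++ c :: rest = (done ++ [c]) ++ rest := by simp
    rw [List.filter_cons]
    by_cases hm : c ∈ done
    · have hb : done.contains c = true := by simpa using hm
      rw [if_neg (by simp [hslice, hm])]
      rw [hstep, happ, ih (done ++ [c])]
      rw [pvDedupNew, hb, if_pos rfl]
      apply pvDedupNew_congr
      intro x
      simp only [List.mem_append, List.mem_singleton]
      constructor
      · rintro (h | rfl)
        · exact h
        · exact hm
      · intro h; exact Or.inl h
    · have hb : done.contains c = false := by simpa using hm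
      rw [if_pos (by simp [hslice, hm])]
      rw [List.map_cons, hstep, happ, ih (done ++ [c])]
      rw [pvDedupNew, hb, if_neg (by simp)]

theorem pvEnumFilter_nil (cs : List String) :
    (((PySem.List.enumerate cs 0).filter
        (fun p => decide (p.2 ∉ PySem.List.slice cs none (some p.1)))).map (·.2))
      = pvDedupNew [] cs := by
  simpa using pvEnumFilter_eq cs []

theorem pvLoop_eq (limit : Int) (lines : List String) : ∀ (ids seen : List String),
    (ids.length : Int) < limit →
    extract_failed_test_ids_loop limit lines ids seen =
      ids ++ List.take (limit - ids.length).toNat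
        (pvDedupNew seen ((lines.map line_candidate).filter (fun c => decide (c ≠ "")))) := by
  induction lines with
  | nil => intro ids seen _; simp [extract_failed_test_ids_loop, pvDedupNew]
  | cons raw rest ih =>
    intro ids seen hlt
    have hcons : extract_failed_test_ids_loop limit (raw :: rest) ids seen =
        (let c := line_candidate raw
         let p := if c ≠ "" ∧ seen.contains c = false then (ids ++ [c], PySem.Set.add seen c)
           else (ids, seen)
         if limit ≤ (p.1.length : Int) then p.1
         else extract_failed_test_ids_loop limit rest p.1 p.2) := rfl
    rw [hcons]
    by_cases hc : line_candidate raw = ""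
    · -- no candidate on this line: nothing appended, loop continues (length unchanged, < limit)
      simp only [hc, ne_eq, not_true_eq_false, false_and, if_neg, not_false_eq_true]
      have : ¬ limit ≤ (ids.length : Int) := by omega
      simp only [this, if_false, ih ids seen hlt]
      simp [hc]
    · by_cases hseen : seen.contains (line_candidate raw)
      · -- duplicate candidate: A skips it, B's dedup drops it
        have hm : line_candidate raw ∈ seen := by simpa using hseen
        simp only [hseen, ne_eq, hc, not_false_eq_true, true_and, Bool.true_eq_false, if_neg,
          not_false_eq_true, if_false]
        have : ¬ limit ≤ (ids.length : Int) := by omega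
        simp only [this, if_false, ih ids seen hlt]
        simp [hc, hm, pvDedupNew]
      · -- fresh candidate: appended on both sides
        have hm : line_candidate raw ∉ seen := by simpa using hseen
        have hcf : seen.contains (line_candidate raw) = false := by simpa using hm
        have hadd : PySem.Set.add seen (line_candidate raw) = seen ++ [line_candidate raw] := by
          simp [PySem.Set.add, hm]
        simp only [ne_eq, hc, not_false_eq_true, hcf, and_self, and_true, true_and, ite_true, hadd]
        have hfilter : ((raw :: rest).map line_candidate).filter (fun c => decide (c ≠ "")) =
            line_candidate raw :: ((rest.map line_candidate).filter (fun c => decide (c ≠ ""))) := by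
          simp [hc]
        rw [hfilter]
        have hded : pvDedupNew seen (line_candidate raw :: ((rest.map line_candidate).filter (fun c => decide (c ≠ "")))) =
            line_candidate raw :: pvDedupNew (seen ++ [line_candidate raw])
              ((rest.map line_candidate).filter (fun c => decide (c ≠ ""))) := by
          simp [pvDedupNew, hm]
        rw [hded]
        by_cases hbreak : limit ≤ ((ids ++ [line_candidate raw]).length : Int)
        · -- the break fires right after this append: limit = ids.length + 1, take exactly this one
          have h1 : (limit - ids.length).toNat = 1 := by simp at hbreak ⊢; omega
          rw [if_pos hbreak, h1]
          simp
        · have hlt' : (((ids ++ [line_candidate raw]).length : Int)) < limit := by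
            simp at hbreak ⊢; omega
          rw [if_neg hbreak, ih (ids ++ [line_candidate raw]) (seen ++ [line_candidate raw]) hlt']
          have harith : (limit - ((ids ++ [line_candidate raw]).length : Int)).toNat + 1 =
              (limit - ids.length).toNat := by simp; omega
          rw [← harith, List.take_succ_cons]
          simp

theorem pvEmpty_eq : (PySem.Set.empty : PySem.Set String) = ([] : List String) := rfl

theorem extract_failed_test_ids_py_spec : Claim_unchanged_extract_failed_test_ids_py := by
  intro text limit _ hnd
  show extract_failed_test_ids_py text limit = extract_failed_test_ids_py_alt text limit
  unfold extract_failed_test_ids_py extract_failed_test_ids_py_alt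
  by_cases hl : limit ≤ 0
  · -- limit ≤ 0 and (by ¬D_) the first line, if any, matches no failure pattern: both sides are []
    have hmax : max limit 0 = 0 := by omega
    rw [hmax, PySem.List.slice_to _ (le_refl 0)]
    simp only [Int.toNat_zero, List.take_zero]
    cases hsplit : PySem.Str.splitlines text with
    | nil => rfl
    | cons l rest =>
      have hfail : pvFailLine l = false := by
        rw [D_extract_failed_test_ids_py] at hnd
        by_contra hcontra
        exact hnd ⟨hl, by rw [hsplit]; simp, by
          rw [hsplit]; simp only [List.headD_cons]; simpa using hcontra⟩
      have hcand : line_candidate l = "" := (pvCandEmptyIff l).mpr hfail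
      have hcons : extract_failed_test_ids_loop limit (l :: rest) [] PySem.Set.empty =
          (let c := line_candidate l
           let p := if c ≠ "" ∧ (PySem.Set.empty : PySem.Set String).contains c = false then
               (([] : List String) ++ [c], PySem.Set.add PySem.Set.empty c)
             else ([], PySem.Set.empty)
           if limit ≤ (p.1.length : Int) then p.1
           else extract_failed_test_ids_loop limit rest p.1 p.2) := rfl
      rw [hcons]
      simp only [hcand, ne_eq, not_true_eq_false, false_and, if_neg, not_false_eq_true,
        List.length_nil, Int.natCast_zero]
      rw [if_pos (by exact_mod_cast hl)]
  · -- limit ≥ 1: A's pass with break = B's prefix-membership filter, then truncate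
    have h0 : ((([] : List String)).length : Int) < limit := by simp; omega
    rw [pvLoop_eq limit (PySem.Str.splitlines text) [] PySem.Set.empty h0]
    have hmax : max limit 0 = limit := by omega
    rw [hmax, PySem.List.slice_to _ (by omega : (0:Int) ≤ limit), pvEnumFilter_nil]
    simp [pvEmpty_eq]

theorem extract_failed_test_ids_py_changed : Claim_changed_extract_failed_test_ids_py := by
  unfold Claim_changed_extract_failed_test_ids_py; decide

theorem extract_failed_test_ids_py_tight : Claim_exact_extract_failed_test_ids_py := by
  intro text limit _ hD
  obtain ⟨hl, hne, hfl⟩ := hD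
  cases hsplit : PySem.Str.splitlines text with
  | nil => exact absurd hsplit hne
  | cons l rest =>
    rw [hsplit] at hfl
    simp only [List.headD_cons] at hfl
    have hc : line_candidate l ≠ "" := by
      intro h
      rw [(pvCandEmptyIff l).mp h] at hfl
      simp at hfl
    have hB : extract_failed_test_ids_py_alt text limit = [] := by
      rw [extract_failed_test_ids_py_alt]
      rw [show max limit 0 = 0 from by omega, PySem.List.slice_to _ (le_refl 0)]
      simp
    have hA : extract_failed_test_ids_py text limit = [line_candidate l] := by
      rw [extract_failed_test_ids_py, hsplit]
      have hcons : extract_failed_test_ids_loop limit (l :: rest) [] PySem.Set.empty =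
          (let c := line_candidate l
           let p := if c ≠ "" ∧ (PySem.Set.empty : PySem.Set String).contains c = false then
               (([] : List String) ++ [c], PySem.Set.add PySem.Set.empty c)
             else ([], PySem.Set.empty)
           if limit ≤ (p.1.length : Int) then p.1
           else extract_failed_test_ids_loop limit rest p.1 p.2) := rfl
      rw [hcons]
      have hcf : (PySem.Set.empty : PySem.Set String).contains (line_candidate l) = false := rfl
      simp only [ne_eq, hc, not_false_eq_true, hcf, and_self, and_true, true_and, ite_true,
        List.nil_append]
      rw [if_pos (show limit ≤ (([line_candidate l] : List String).length : Int) from by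
        simp; omega)]
    rw [hA, hB]
    simp
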